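-- pv_equiv track=rewrite | github.com/foggynight/truth-table-gen | truth-table-gen.py | var_bind_combos
-- ===== SOURCE A (Python) =====
-- def var_bind_combos(vars):
--     pairs = [[v, False] for v in vars]
--     pairs.reverse()
--
--     def pairs_increment():
--         for i in range(len(pairs)):
--             pairs[i][1] = not pairs[i][1]
--             carry = pairs[i][1] == False
--             if carry == False:
--                 break
--
--     combos = [dict(reversed(pairs))]
--     for i in range(2**len(vars) - 1):
--         pairs_increment()
--         combos.append(dict(reversed(pairs)))
--     return combos
-- ===== SOURCE B (Python) =====
-- def var_bind_combos(variables):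
--     combos = [[]]
--     for _ in variables:
--         combos = [[b] + tail for b in (False, True) for tail in combos]
--     return [dict(zip(variables, combo)) for combo in combos]
-- ===== Notes on version B (the rewrite author's own statement) =====
-- stated objective: idiomatic
-- what changed: Replaces A's in-place reversed-pairs binary-counter mutation (repeatedly incrementing a shared list and snapshotting dicts) by a pure fold that builds the {False,True} cartesian product in counting order and zips each tuple against vars.
import Mathlib
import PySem

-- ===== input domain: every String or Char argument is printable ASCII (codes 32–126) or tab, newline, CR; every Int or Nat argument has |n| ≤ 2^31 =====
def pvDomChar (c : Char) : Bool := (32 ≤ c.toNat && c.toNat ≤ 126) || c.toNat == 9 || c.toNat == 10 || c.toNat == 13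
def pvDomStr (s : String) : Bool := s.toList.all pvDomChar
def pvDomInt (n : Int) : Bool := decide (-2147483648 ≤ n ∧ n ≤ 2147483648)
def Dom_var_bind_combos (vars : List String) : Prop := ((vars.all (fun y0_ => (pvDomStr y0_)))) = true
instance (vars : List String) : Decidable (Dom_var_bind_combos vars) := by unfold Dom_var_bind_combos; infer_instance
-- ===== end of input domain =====

-- B replaces A's in-place binary-counter mutation by building the cartesian
-- product of {False, True} with a fold and zipping each tuple against vars
-- (objective: idiomatic; same asymptotic cost).

-- ===== PORT A =====
-- pairs_increment: walk from index 0 (the LSB, since pairs is reversed),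
-- flip, stop at the first flip-to-True (no carry); mutation becomes recursion.
def aInc : List (String × Bool) → List (String × Bool)
  | [] => []
  | (v, b) :: rest => if b then (v, false) :: aInc rest else (v, true) :: rest

def var_bind_combos (vars : List String) : List (List (String × Bool)) :=
  let pairs0 := (vars.map (fun v => (v, false))).reverse
  let st := (PySem.List.pyRange 0 ((2:Int) ^ vars.length - 1) 1).foldl
      (fun (s : List (String × Bool) × List (List (String × Bool))) _ =>
        let p := aInc s.1
        (p, s.2 ++ [(PySem.Dict.ofList p.reverse).items]))
      (pairs0, [(PySem.Dict.ofList pairs0.reverse).items])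
  st.2

-- ===== PORT B =====
def var_bind_combos_alt (vars : List String) : List (List (String × Bool)) :=
  let combos := vars.foldl
      (fun (combos : List (List Bool)) _ =>
        [false, true].flatMap (fun b => combos.map (fun tail => b :: tail)))
      [[]]
  combos.map (fun combo => (PySem.Dict.ofList (vars.zip combo)).items)

-- ===== PRECONDITION & SPEC =====
def Spec_var_bind_combos (vars : List String) (out : List (List (String × Bool))) : Prop := out = var_bind_combos_alt vars
instance (vars : List String) (out : List (List (String × Bool))) : Decidable (Spec_var_bind_combos vars out) := by unfold Spec_var_bind_combos; infer_instance

-- ===== CLAIM (what is proved, stated in full; the proofs are below) =====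
def Claim_equal_var_bind_combos : Prop := ∀ (vars : List String), Dom_var_bind_combos vars → Spec_var_bind_combos vars (var_bind_combos vars)

-- ===== LEMMAS AND PROOFS =====

-- LSB-first binary increment on a plain bit list
def incB : List Bool → List Bool
  | [] => []
  | b :: r => if b then false :: incB r else true :: r

-- trajectory of k successive states starting at s
def trajB : List Bool → Nat → List (List Bool)
  | _, 0 => []
  | s, k+1 => s :: trajB (incB s) k

def trajP : List (String × Bool) → Nat → List (List (String × Bool))
  | _, 0 => []
  | s, k+1 => s :: trajP (aInc s) k

-- LSB-last enumeration (reverse of each trajB state)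
def Pn : Nat → List (List Bool)
  | 0 => [[]]
  | n+1 => (Pn n).map (· ++ [false]) ++ (Pn n).map (· ++ [true])

def stepB (c : List (List Bool)) : List (List Bool) :=
  [false, true].flatMap (fun b => c.map (fun tail => b :: tail))

theorem incB_length (bs : List Bool) : (incB bs).length = bs.length := by
  induction bs with
  | nil => rfl
  | cons b r ih => by_cases hb : b <;> simp [incB, hb, ih]

theorem aInc_zip (ks : List String) (bs : List Bool) (h : ks.length = bs.length) :
    aInc (ks.zip bs) = ks.zip (incB bs) := by
  induction ks generalizing bs with
  | nil => simp [aInc]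
  | cons k ks ih =>
    cases bs with
    | nil => simp at h
    | cons b r =>
      by_cases hb : b <;>
        simp_all [aInc, incB, List.zip_cons_cons]

theorem trajP_zip (ks : List String) (bs : List Bool) (k : Nat)
    (h : ks.length = bs.length) :
    trajP (ks.zip bs) k = (trajB bs k).map (fun c => ks.zip c) := by
  induction k generalizing bs with
  | zero => rfl
  | succ k ih =>
    simp only [trajP, trajB, List.map_cons]
    rw [aInc_zip ks bs h, ih (incB bs) (by rw [incB_length]; exact h)]

theorem trajB_split (j k : Nat) (s : List Bool) :
    trajB s (j + k) = trajB s j ++ trajB (incB^[j] s) k := by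
  induction j generalizing s with
  | zero => simp [trajB]
  | succ j ih =>
    have : j + 1 + k = (j + k) + 1 := by omega
    rw [this]
    simp only [trajB, List.cons_append]
    rw [ih (incB s), Function.iterate_succ_apply]

theorem trajB_affix (n : Nat) : ∀ t : List Bool,
    trajB (List.replicate n false ++ t) (2 ^ n) = (Pn n).map (· ++ t) ∧
    incB^[2 ^ n] (List.replicate n false ++ t) = List.replicate n false ++ incB t := by
  induction n with
  | zero =>
    intro t
    constructor
    · simp [trajB, Pn]
    · simp
  | succ n ih =>
    intro t
    have hpow : 2 ^ (n + 1) = 2 ^ n + 2 ^ n := by ring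
    have hrepl : List.replicate (n+1) false ++ t
        = List.replicate n false ++ (false :: t) := by
      simp [List.replicate_succ']
    have h1 := ih (false :: t)
    have h2 := ih (true :: t)
    have hstep : incB (false :: t) = true :: t := by simp [incB]
    have hstep2 : incB (true :: t) = false :: incB t := by simp [incB]
    constructor
    · rw [hrepl, hpow, trajB_split, h1.1, h1.2, hstep, h2.1]
      simp [Pn, List.map_map, Function.comp_def, List.append_assoc]
    · rw [hrepl, hpow, Function.iterate_add_apply, h1.2, hstep, h2.2, hstep2]
      simp [List.replicate_succ', List.append_assoc]

theorem mem_Pn_length (n : Nat) (bs : List Bool) (h : bs ∈ Pn n) : bs.length = n := by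
  induction n generalizing bs with
  | zero => simp [Pn] at h; simp [h]
  | succ n ih =>
    simp only [Pn, List.mem_append, List.mem_map] at h
    rcases h with ⟨c, hc, rfl⟩ | ⟨c, hc, rfl⟩ <;> simp [ih c hc]

theorem zip_reverse (ks : List String) (bs : List Bool) (h : ks.length = bs.length) :
    (ks.zip bs).reverse = ks.reverse.zip bs.reverse := by
  induction ks generalizing bs with
  | nil => simp
  | cons k ks ih =>
    cases bs with
    | nil => simp at h
    | cons b r =>
      simp only [List.zip_cons_cons, List.reverse_cons]
      rw [ih r (by simpa using h), List.zip_append (by simp at h ⊢; omega)]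
      simp

theorem map_pair_false (l : List String) :
    l.map (fun v => (v, false)) = l.zip (List.replicate l.length false) := by
  induction l with
  | nil => rfl
  | cons x l ih => simp [List.replicate_succ, ih]

theorem foldl_trajP (l : List Int) (s : List (String × Bool))
    (acc : List (List (String × Bool))) :
    (l.foldl
      (fun (st : List (String × Bool) × List (List (String × Bool))) _ =>
        let p := aInc st.1
        (p, st.2 ++ [(PySem.Dict.ofList p.reverse).items]))
      (s, acc)).2
    = acc ++ (trajP (aInc s) l.length).map
        (fun p => (PySem.Dict.ofList p.reverse).items) := by
  induction l generalizing s acc with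
  | nil => simp [trajP]
  | cons x l ih =>
    simp only [List.foldl_cons, List.length_cons]
    rw [ih]
    simp [trajP]

theorem foldl_stepB (l : List String) (acc : List (List Bool)) :
    l.foldl
      (fun (combos : List (List Bool)) _ =>
        [false, true].flatMap (fun b => combos.map (fun tail => b :: tail)))
      acc = stepB^[l.length] acc := by
  induction l generalizing acc with
  | nil => rfl
  | cons x l ih =>
    simp only [List.foldl_cons, List.length_cons]
    rw [ih, Function.iterate_succ_apply]
    rfl

theorem stepB_iterate (n : Nat) : stepB^[n] [[]] = (Pn n).map List.reverse := by
  induction n with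
  | zero => simp [Pn]
  | succ n ih =>
    rw [Function.iterate_succ_apply', ih]
    simp [stepB, Pn, List.map_map, Function.comp_def, List.flatMap_cons,
      List.flatMap_nil, List.reverse_append]

theorem pow_sub_one_toNat (n : Nat) : ((2:Int) ^ n - 1).toNat = 2 ^ n - 1 := by
  have hcast : (2:Int) ^ n = ((2 ^ n : Nat) : Int) := by push_cast; ring
  omega

-- ===== VERDICT (by name: the statement is the Claim_ definition above) =====
theorem var_bind_combos_spec : Claim_equal_var_bind_combos := by
  intro vars _
  unfold Spec_var_bind_combos var_bind_combos var_bind_combos_alt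
  set n := vars.length with hn
  have hone : 1 ≤ 2 ^ n := Nat.one_le_two_pow
  simp only
  rw [foldl_trajP]
  rw [PySem.List.length_pyRange_one]
  simp only [sub_zero, pow_sub_one_toNat]
  -- glue the initial combo back on: combos = map g (trajP pairs0 (2^n))
  have hsplit :
      ((PySem.Dict.ofList ((vars.map (fun v => (v, false))).reverse).reverse).items ::
        (trajP (aInc ((vars.map (fun v => (v, false))).reverse)) (2 ^ n - 1)).map
          (fun p => (PySem.Dict.ofList p.reverse).items))
      = (trajP ((vars.map (fun v => (v, false))).reverse) (2 ^ n)).map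
          (fun p => (PySem.Dict.ofList p.reverse).items) := by
    obtain ⟨k, hk⟩ : ∃ k, 2 ^ n = k + 1 := ⟨2 ^ n - 1, by omega⟩
    rw [hk]
    simp [trajP]
  rw [List.singleton_append, hsplit]
  -- pairs0 = vars.reverse.zip (replicate n false)
  have hpairs0 : (vars.map (fun v => (v, false))).reverse
      = vars.reverse.zip (List.replicate n false) := by
    rw [map_pair_false, zip_reverse _ _ (by simp), List.reverse_replicate, hn]
  rw [hpairs0, trajP_zip _ _ _ (by simp [hn])]
  have haffix := (trajB_affix n []).1
  simp only [List.append_nil] at haffix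
  rw [haffix]
  simp only [List.map_map]
  -- B side
  rw [foldl_stepB, stepB_iterate]
  rw [List.map_map]
  apply List.map_congr_left
  intro bs hbs
  have hlen : bs.length = n := mem_Pn_length n bs hbs
  simp only [Function.comp_apply]
  congr 1
  rw [zip_reverse _ _ (by simp [hlen, hn]), List.reverse_reverse]
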